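-- pv_equiv track=rewrite | github.com/cheolsoon1234/EC2206 | Assignment_4/Q2.py | DynamicAdventure
-- ===== SOURCE A (Python) =====
-- def DynamicAdventure(arr):
--
--     x = arr[0]
--     blocks = arr[1:]
--
--     NEG_INF = -10000 * 10000
--     dp = [NEG_INF] * len(blocks)  # small enough number for dp
--     dp[0] = blocks[0]
--
--     for i in range(1, len(blocks)):
--         best = NEG_INF
--         for jumps in range(1, x+1):
--             prev = i - jumps
--             if prev < 0:
--                 continue  # 경계 체크
--             if dp[prev] == NEG_INF:
--                 continue  # 도달 불가 상태는 스킵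
--             best = max(best, dp[prev] + blocks[i])
--         dp[i] = best
--
--     return dp[-1]
-- ===== SOURCE B (Python) =====
-- def DynamicAdventure(arr):
--     # Sliding-window maximum via a monotonic deque (list + head index used as a
--     # deque), so each dp value is computed in amortized O(1) instead of an O(x)
--     # inner scan.
--     x = arr[0]
--     blocks = arr[1:]
--
--     NEG_INF = -10000 * 10000
--     # dq holds (index, dp value) pairs with values strictly decreasing from
--     # dq[head]; head is the logical front (popleft = head += 1).
--     dq = []
--     head = 0
--     prev_dp = blocks[0]  # dp value of the previous block
--
--     for i in range(1, len(blocks)):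
--         if prev_dp != NEG_INF:
--             while len(dq) > head and dq[-1][1] <= prev_dp:
--                 dq.pop()
--             dq.append((i - 1, prev_dp))
--         while len(dq) > head and dq[head][0] < i - x:
--             head += 1
--         if len(dq) > head:
--             cur = dq[head][1] + blocks[i]
--             if cur < NEG_INF:
--                 cur = NEG_INF
--         else:
--             cur = NEG_INF
--         prev_dp = cur
--
--     return prev_dp
-- ===== Notes on version B (the rewrite author's own statement) =====
-- stated objective: faster
-- what changed: Replaces the O(x) inner scan over the last x dp values by a monotonic deque (sliding-window maximum) carrying only the previous dp value, so each block is processed in amortized O(1).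
import Mathlib
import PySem

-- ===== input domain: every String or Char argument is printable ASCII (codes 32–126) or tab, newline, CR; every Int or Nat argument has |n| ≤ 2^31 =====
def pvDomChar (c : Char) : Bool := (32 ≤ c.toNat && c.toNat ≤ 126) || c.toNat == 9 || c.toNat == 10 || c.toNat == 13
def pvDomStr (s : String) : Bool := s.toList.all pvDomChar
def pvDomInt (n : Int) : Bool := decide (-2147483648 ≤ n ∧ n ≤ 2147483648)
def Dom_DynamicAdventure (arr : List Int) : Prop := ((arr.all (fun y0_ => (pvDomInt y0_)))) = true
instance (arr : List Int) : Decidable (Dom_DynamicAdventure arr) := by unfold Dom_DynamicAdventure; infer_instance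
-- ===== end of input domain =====

-- B replaces A's O(x) inner scan over the dp window by a monotonic deque
-- (sliding-window maximum), processing each block in amortized O(1).

-- NEG_INF = -10000 * 10000 (the sentinel both programs use)
def pvNegInf : Int := -10000 * 10000

-- ===== PORT A =====
def DynamicAdventure (arr : List Int) : Int :=
  let x := (PySem.List.pyGet? arr 0).getD 0                 -- x = arr[0]
  let blocks := PySem.List.slice arr (some 1) none          -- blocks = arr[1:]
  let dp0 := (List.replicate blocks.length pvNegInf).set 0
      ((PySem.List.pyGet? blocks 0).getD 0)                 -- dp = [NEG_INF]*len; dp[0] = blocks[0]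
  let dp := (PySem.List.pyRange 1 (blocks.length : Int) 1).foldl (fun dp i =>
      let best := (PySem.List.pyRange 1 (x + 1) 1).foldl (fun best jumps =>
          let prev := i - jumps
          if prev < 0 then best                             -- boundary check
          else if PySem.List.pyGetD dp prev 0 = pvNegInf then best  -- unreachable: skip
          else max best (PySem.List.pyGetD dp prev 0 + PySem.List.pyGetD blocks i 0))
        pvNegInf
      PySem.List.pySetD dp i best)                          -- dp[i] = best
    dp0
  PySem.List.pyGetD dp (-1) 0                               -- return dp[-1]

-- ===== PORT B =====
-- The deque holds (index, dp value) pairs; in this Lean list the NEWEST entry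
-- is at the head (Source B keeps it at the end of its list and pops the front by
-- advancing a head index — same deque, mirrored representation).
-- while dq and dq[-1][1] <= v: dq.pop()
def pvPopLE (v : Int) : List (Int × Int) → List (Int × Int)
  | [] => []
  | p :: rest => if p.2 ≤ v then pvPopLE v rest else p :: rest

-- while dq and dq[head][0] < bound: head += 1   (drop stale entries at the front)
def pvEvict (bound : Int) (dq : List (Int × Int)) : List (Int × Int) :=
  match _h : dq.getLast? with
  | none => dq
  | some p => if p.1 < bound then pvEvict bound dq.dropLast else dq
termination_by dq.length
decreasing_by
  have : dq ≠ [] := by intro hn; simp [hn] at _h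
  simpa [List.length_dropLast] using Nat.sub_lt (List.length_pos_iff.mpr this) one_pos

def DynamicAdventure_alt (arr : List Int) : Int :=
  let x := (PySem.List.pyGet? arr 0).getD 0                 -- x = arr[0]
  let blocks := PySem.List.slice arr (some 1) none          -- blocks = arr[1:]
  let st := (PySem.List.pyRange 1 (blocks.length : Int) 1).foldl
    (fun (st : List (Int × Int) × Int) i =>
      let dq := if st.2 ≠ pvNegInf
        then (i - 1, st.2) :: pvPopLE st.2 st.1             -- push dp[i-1] as new maximum candidate
        else st.1
      let dq := pvEvict (i - x) dq                          -- evict entries left of the window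
      let cur := match dq.getLast? with                     -- front of the deque = window max
        | some p =>
          if p.2 + PySem.List.pyGetD blocks i 0 < pvNegInf then pvNegInf
          else p.2 + PySem.List.pyGetD blocks i 0
        | none => pvNegInf
      (dq, cur))
    ([], (PySem.List.pyGet? blocks 0).getD 0)               -- prev_dp = blocks[0]
  st.2

-- ===== PRECONDITION & SPEC =====
-- Pre_ excludes only the inputs on which A raises IndexError (lists with fewer
-- than two elements, which have no jump length or no first block); B raises there too.
def Pre_DynamicAdventure (arr : List Int) : Prop := 2 ≤ arr.length
instance (arr : List Int) : Decidable (Pre_DynamicAdventure arr) := by unfold Pre_DynamicAdventure; infer_instance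
def pvWitness_DynamicAdventure : List Int := [2, 3, -1, 4]

def Spec_DynamicAdventure (arr : List Int) (out : Int) : Prop := out = DynamicAdventure_alt arr
instance (arr : List Int) (out : Int) : Decidable (Spec_DynamicAdventure arr out) := by unfold Spec_DynamicAdventure; infer_instance

-- ===== CLAIM (what is proved, stated in full; the proofs are below) =====
def Claim_equal_DynamicAdventure : Prop := ∀ (arr : List Int), Dom_DynamicAdventure arr → Pre_DynamicAdventure arr → Spec_DynamicAdventure arr (DynamicAdventure arr)

-- ===== LEMMAS AND PROOFS =====

-- Reference semantics: pvDp x b n = the list [dp 0, …, dp (n-1)] of A's dp values.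
def pvWMax (x : Int) (dp : List Int) (i : Int) : Option Int :=
  (PySem.List.pyRange 1 (x + 1) 1).foldl (fun acc jumps =>
    let prev := i - jumps
    if prev < 0 then acc
    else if PySem.List.pyGetD dp prev 0 = pvNegInf then acc
    else some (match acc with
               | none => PySem.List.pyGetD dp prev 0
               | some m => max m (PySem.List.pyGetD dp prev 0))) none

def pvDp (x : Int) (b : List Int) : Nat → List Int
  | 0 => []
  | i + 1 =>
    let prevL := pvDp x b i
    prevL ++ [if i = 0 then b.getD 0 0
              else match pvWMax x prevL (i : Int) with
                   | none => pvNegInf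
                   | some m => max pvNegInf (m + b.getD i 0)]

def pvVal (x : Int) (b : List Int) (i : Nat) : Int := (pvDp x b (i + 1)).getD i 0

theorem pvDp_length (x : Int) (b : List Int) (n : Nat) : (pvDp x b n).length = n := by
  induction n with
  | zero => simp [pvDp]
  | succ m ih => simp [pvDp, ih]

theorem pvVal_eq (x : Int) (b : List Int) (i : Nat) :
    pvVal x b i = (if i = 0 then b.getD 0 0
                   else match pvWMax x (pvDp x b i) (i : Int) with
                        | none => pvNegInf
                        | some m => max pvNegInf (m + b.getD i 0)) := by
  show ((pvDp x b i) ++ _).getD i 0 = _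
  rw [List.getD_append_right _ _ _ _ (by rw [pvDp_length])]
  simp [pvDp_length]

theorem pvDp_succ (x : Int) (b : List Int) (i : Nat) :
    pvDp x b (i + 1) = pvDp x b i ++ [pvVal x b i] := by
  rw [pvVal_eq]; rfl

theorem pvDp_getD (x : Int) (b : List Int) {j n : Nat} (h : j < n) :
    (pvDp x b n).getD j 0 = pvVal x b j := by
  induction n with
  | zero => omega
  | succ m ih =>
    rcases Nat.lt_succ_iff_lt_or_eq.mp h with hlt | rfl
    · show ((pvDp x b m) ++ _).getD j 0 = _
      rw [List.getD_append _ _ _ _ (by rw [pvDp_length]; exact hlt)]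
      exact ih hlt
    · rfl

-- A's inner loop, with its accumulator shifted through `fun m => max pvNegInf (m + bi)`,
-- is the option-valued running maximum pvWMax.
theorem pvInner_bridge (dp : List Int) (i bi : Int) (l : List Int) (acc : Option Int) :
    l.foldl (fun best jumps =>
        let prev := i - jumps
        if prev < 0 then best
        else if PySem.List.pyGetD dp prev 0 = pvNegInf then best
        else max best (PySem.List.pyGetD dp prev 0 + bi))
      (match acc with | none => pvNegInf | some m => max pvNegInf (m + bi))
    = (match l.foldl (fun acc jumps =>
          let prev := i - jumps
          if prev < 0 then acc
          else if PySem.List.pyGetD dp prev 0 = pvNegInf then acc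
          else some (match acc with
                     | none => PySem.List.pyGetD dp prev 0
                     | some m => max m (PySem.List.pyGetD dp prev 0))) acc with
       | none => pvNegInf | some m => max pvNegInf (m + bi)) := by
  induction l generalizing acc with
  | nil => rfl
  | cons a t ih =>
    simp only [List.foldl_cons]
    by_cases h1 : i - a < 0
    · simp only [h1, if_true]; exact ih acc
    · by_cases h2 : PySem.List.pyGetD dp (i - a) 0 = pvNegInf
      · simp only [h1, if_false, h2, if_true]; exact ih acc
      · simp only [h1, if_false, h2]
        cases acc with
        | none => simpa using ih (some (PySem.List.pyGetD dp (i - a) 0))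
        | some m =>
          have heq : max (max pvNegInf (m + bi)) (PySem.List.pyGetD dp (i - a) 0 + bi)
              = max pvNegInf (max m (PySem.List.pyGetD dp (i - a) 0) + bi) := by omega
          rw [heq]
          simpa using ih (some (max m (PySem.List.pyGetD dp (i - a) 0)))

theorem pvInner_eq (x : Int) (dp : List Int) (i bi : Int) :
    (PySem.List.pyRange 1 (x + 1) 1).foldl (fun best jumps =>
        if i - jumps < 0 then best
        else if PySem.List.pyGetD dp (i - jumps) 0 = pvNegInf then best
        else max best (PySem.List.pyGetD dp (i - jumps) 0 + bi)) pvNegInf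
    = match pvWMax x dp i with
      | none => pvNegInf
      | some m => max pvNegInf (m + bi) :=
  pvInner_bridge dp i bi (PySem.List.pyRange 1 (x + 1) 1) none

theorem pvWMax_congr (x : Int) (i : Int) (dp dp' : List Int)
    (h : ∀ prev : Int, 0 ≤ prev → prev < i →
      PySem.List.pyGetD dp prev 0 = PySem.List.pyGetD dp' prev 0) :
    pvWMax x dp i = pvWMax x dp' i := by
  unfold pvWMax
  apply PySem.List.foldl_congr_mem
  intro acc jumps hj
  have h1 : 1 ≤ jumps := (PySem.List.mem_pyRange_one.mp hj).1
  by_cases hp : i - jumps < 0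
  · simp only [hp, if_true]
  · simp only [hp, if_false, h (i - jumps) (by omega) (by omega)]

theorem pv_set_append (l r : List Int) (a v : Int) :
    (l ++ a :: r).set l.length v = l ++ v :: r := by
  induction l with
  | nil => rfl
  | cons y t ih => simp [ih]

theorem pv_set_append' (l r : List Int) (a v : Int) (n : Nat) (h : n = l.length) :
    (l ++ a :: r).set n v = l ++ v :: r := h ▸ pv_set_append l r a v

-- A's outer loop after i iterations: the first i dp entries are computed, the rest still NEG_INF.
theorem pvA_fold (x : Int) (b : List Int) (hb : 1 ≤ b.length) (i : Nat) (h1 : 1 ≤ i)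
    (hin : i ≤ b.length) :
    (PySem.List.pyRange 1 (i : Int) 1).foldl
      (fun dp ii =>
        let best := (PySem.List.pyRange 1 (x + 1) 1).foldl (fun best jumps =>
            let prev := ii - jumps
            if prev < 0 then best
            else if PySem.List.pyGetD dp prev 0 = pvNegInf then best
            else max best (PySem.List.pyGetD dp prev 0 + PySem.List.pyGetD b ii 0)) pvNegInf
        PySem.List.pySetD dp ii best)
      ((List.replicate b.length pvNegInf).set 0 ((PySem.List.pyGet? b 0).getD 0))
    = pvDp x b i ++ List.replicate (b.length - i) pvNegInf := by
  set AS := (fun (dp : List Int) (ii : Int) =>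
        let best := (PySem.List.pyRange 1 (x + 1) 1).foldl (fun best jumps =>
            let prev := ii - jumps
            if prev < 0 then best
            else if PySem.List.pyGetD dp prev 0 = pvNegInf then best
            else max best (PySem.List.pyGetD dp prev 0 + PySem.List.pyGetD b ii 0)) pvNegInf
        PySem.List.pySetD dp ii best) with hAS
  induction i, h1 using Nat.le_induction with
  | base =>
    rw [show ((1 : Nat) : Int) = (1 : Int) from by norm_num,
        PySem.List.pyRange_one_eq_nil le_rfl, List.foldl_nil]
    obtain ⟨m, hm⟩ : ∃ m, b.length = m + 1 := ⟨b.length - 1, by omega⟩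
    rw [hm]
    simp [pvDp, List.replicate_succ, PySem.List.pyGet?_zero, List.getD_eq_getElem?_getD]
  | succ i h1 ih =>
    have hii : ((i + 1 : Nat) : Int) = (i : Int) + 1 := by push_cast; ring
    rw [hii, PySem.List.pyRange_one_succ_right (by omega), List.foldl_append, ih (by omega)]
    simp only [List.foldl_cons, List.foldl_nil, hAS]
    have hpad : ∀ prev : Int, 0 ≤ prev → prev < (i : Int) →
        PySem.List.pyGetD (pvDp x b i ++ List.replicate (b.length - i) pvNegInf) prev 0
          = PySem.List.pyGetD (pvDp x b i) prev 0 := by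
      intro prev hp0 hpi
      have hlen : (pvDp x b i).length = i := pvDp_length x b i
      have h1' : prev.toNat < (pvDp x b i).length := by omega
      rw [PySem.List.pyGetD_eq_getElem _ _ hp0 (by simp [hlen]; omega),
          PySem.List.pyGetD_eq_getElem _ _ hp0 (by simp [hlen]; omega),
          List.getElem_append_left h1']
    rw [pvInner_eq x (pvDp x b i ++ List.replicate (b.length - i) pvNegInf)
          (i : Int) (PySem.List.pyGetD b (i : Int) 0), show pvWMax x (pvDp x b i ++ List.replicate (b.length - i) pvNegInf) (i : Int)
        = pvWMax x (pvDp x b i) (i : Int) from pvWMax_congr _ _ _ _ hpad]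
    have hval : (match pvWMax x (pvDp x b i) (i : Int) with
        | none => pvNegInf
        | some m => max pvNegInf (m + PySem.List.pyGetD b (i : Int) 0)) = pvVal x b i := by
      rw [pvVal_eq, if_neg (by omega), PySem.List.pyGetD_natCast]
    rw [hval, PySem.List.pySetD_natCast]
    obtain ⟨k, hk⟩ : ∃ k, b.length - i = k + 1 := ⟨b.length - i - 1, by omega⟩
    rw [hk, List.replicate_succ,
        pv_set_append' _ _ _ _ i (pvDp_length x b i).symm, pvDp_succ]
    simp [show b.length - (i + 1) = k from by omega]

-- A's return value is the last reference dp entry.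
theorem pvA_eq (arr : List Int) (h : 2 ≤ arr.length) :
    DynamicAdventure arr
      = pvVal ((PySem.List.pyGet? arr 0).getD 0) arr.tail (arr.tail.length - 1) := by
  unfold DynamicAdventure
  rw [PySem.List.slice_from_one]
  have hb : 1 ≤ arr.tail.length := by simp [List.length_tail]; omega
  simp only []
  rw [pvA_fold _ arr.tail hb arr.tail.length hb le_rfl]
  obtain ⟨m, hm⟩ : ∃ m, arr.tail.length = m + 1 := ⟨arr.tail.length - 1, by omega⟩
  rw [Nat.sub_self, List.replicate_zero, List.append_nil, hm, pvDp_succ,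
      PySem.List.pyGetD_neg_one_append_singleton]
  simp

-- ---- deque layer ----
theorem pvPopLE_eq_dropWhile (v : Int) (l : List (Int × Int)) :
    pvPopLE v l = l.dropWhile (fun p => decide (p.2 ≤ v)) := by
  induction l with
  | nil => rfl
  | cons a t ih =>
    by_cases h : a.2 ≤ v
    · simp [pvPopLE, h, ih]
    · simp [pvPopLE, h]

-- survivors of a value-sorted pop-while have strictly larger values
theorem pv_mem_dropWhile_val {l : List (Int × Int)}
    (hp : l.Pairwise (fun p q => p.2 < q.2)) {v : Int} {q : Int × Int}
    (hq : q ∈ l.dropWhile (fun p => decide (p.2 ≤ v))) : v < q.2 := by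
  induction l with
  | nil => simp at hq
  | cons a t ih =>
    rw [List.dropWhile_cons] at hq
    by_cases h : a.2 ≤ v
    · simp only [h, decide_true, if_true] at hq
      exact ih (List.Pairwise.of_cons hp) hq
    · simp only [h, decide_false] at hq
      rcases List.mem_cons.mp hq with rfl | hmem
      · omega
      · have := (List.pairwise_cons.mp hp).1 q hmem; omega

-- survivors of an index-sorted pop-while have indices ≥ the bound
theorem pv_mem_dropWhile_idx {l : List (Int × Int)}
    (hp : l.Pairwise (fun p q => p.1 < q.1)) {bd : Int} {q : Int × Int}
    (hq : q ∈ l.dropWhile (fun p => decide (p.1 < bd))) : bd ≤ q.1 := by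
  induction l with
  | nil => simp at hq
  | cons a t ih =>
    rw [List.dropWhile_cons] at hq
    by_cases h : a.1 < bd
    · simp only [h, decide_true, if_true] at hq
      exact ih (List.Pairwise.of_cons hp) hq
    · simp only [h, decide_false] at hq
      rcases List.mem_cons.mp hq with rfl | hmem
      · omega
      · have := (List.pairwise_cons.mp hp).1 q hmem; omega

-- eviction is a pop-while on the reversed list
theorem pvEvict_eq (bound : Int) (dq : List (Int × Int)) :
    pvEvict bound dq = (dq.reverse.dropWhile (fun p => decide (p.1 < bound))).reverse := by
  generalize hm : dq.length = mfuel
  induction mfuel generalizing dq with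
  | zero =>
    have : dq = [] := List.length_eq_zero_iff.mp hm
    subst this; simp [pvEvict]
  | succ m ih =>
    rcases hlast : dq.getLast? with - | p
    · have : dq = [] := List.getLast?_eq_none_iff.mp hlast
      subst this; simp [pvEvict]
    · obtain ⟨ys, rfl⟩ := List.getLast?_eq_some_iff.mp hlast
      rw [pvEvict]
      split
      · rename_i heq
        rw [hlast] at heq; cases heq
      · rename_i p' heq
        rw [hlast] at heq
        injection heq with heq
        subst heq
        by_cases hb : p.1 < bound
        · rw [if_pos hb, List.dropLast_concat,
              ih ys (by simpa using hm)]
          simp [List.reverse_append, hb]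
        · rw [if_neg hb]
          simp [List.reverse_append, hb]

theorem pvEvict_sublist (bound : Int) (dq : List (Int × Int)) :
    (pvEvict bound dq).Sublist dq := by
  rw [pvEvict_eq]
  simpa using (List.dropWhile_sublist (l := dq.reverse)
    (fun p => decide (p.1 < bound))).reverse

theorem pv_mem_evict {bound : Int} {dq : List (Int × Int)} {q : Int × Int}
    (hq : q ∈ dq) (h : ¬ q.1 < bound) : q ∈ pvEvict bound dq := by
  rw [pvEvict_eq, List.mem_reverse]
  have hrev : q ∈ dq.reverse := List.mem_reverse.mpr hq
  rw [← List.takeWhile_append_dropWhile (p := fun p => decide (p.1 < bound))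
        (l := dq.reverse)] at hrev
  rcases List.mem_append.mp hrev with h1 | h2
  · have := List.mem_takeWhile_imp h1
    simp only [decide_eq_true_eq] at this
    exact absurd this h
  · exact h2

theorem pv_mem_evict_bound {bound : Int} {dq : List (Int × Int)}
    (hpair : dq.Pairwise (fun p q => q.1 < p.1)) {q : Int × Int}
    (hq : q ∈ pvEvict bound dq) : bound ≤ q.1 := by
  rw [pvEvict_eq, List.mem_reverse] at hq
  exact pv_mem_dropWhile_idx (List.pairwise_reverse.mpr hpair) hq

theorem pv_getLast_max {R : (Int × Int) → (Int × Int) → Prop} {l : List (Int × Int)}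
    {p : Int × Int} (h : l.getLast? = some p) (hp : l.Pairwise R) :
    ∀ q ∈ l, q = p ∨ R q p := by
  obtain ⟨ys, rfl⟩ := List.getLast?_eq_some_iff.mp h
  intro q hq
  rcases List.mem_append.mp hq with h1 | h2
  · exact Or.inr ((List.pairwise_append.mp hp).2.2 q h1 p (by simp))
  · exact Or.inl (by simpa using h2)

-- ---- characterization of pvWMax: none iff no reachable window index; some m iff m is
-- the attained maximum of the reachable window values ----
theorem pvW_aux (dp : List Int) (i : Int) (l : List Int) (acc : Option Int) :
    (l.foldl (fun acc jumps =>
        let prev := i - jumps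
        if prev < 0 then acc
        else if PySem.List.pyGetD dp prev 0 = pvNegInf then acc
        else some (match acc with
                   | none => PySem.List.pyGetD dp prev 0
                   | some m => max m (PySem.List.pyGetD dp prev 0))) acc = none ↔
      acc = none ∧ ∀ jp ∈ l, ¬(0 ≤ i - jp ∧ PySem.List.pyGetD dp (i - jp) 0 ≠ pvNegInf))
  ∧ (∀ m, l.foldl (fun acc jumps =>
        let prev := i - jumps
        if prev < 0 then acc
        else if PySem.List.pyGetD dp prev 0 = pvNegInf then acc
        else some (match acc with
                   | none => PySem.List.pyGetD dp prev 0
                   | some m => max m (PySem.List.pyGetD dp prev 0))) acc = some m →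
      ((∃ jp ∈ l, (0 ≤ i - jp ∧ PySem.List.pyGetD dp (i - jp) 0 ≠ pvNegInf) ∧
          PySem.List.pyGetD dp (i - jp) 0 = m) ∨ acc = some m)
      ∧ (∀ jp ∈ l, 0 ≤ i - jp → PySem.List.pyGetD dp (i - jp) 0 ≠ pvNegInf →
          PySem.List.pyGetD dp (i - jp) 0 ≤ m)
      ∧ (∀ m₀, acc = some m₀ → m₀ ≤ m)) := by
  induction l generalizing acc with
  | nil =>
    refine ⟨by simp, ?_⟩
    intro m hm
    simp only [List.foldl_nil] at hm
    refine ⟨Or.inr hm, by simp, ?_⟩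
    intro m₀ h₀
    rw [hm] at h₀
    injection h₀ with h
    omega
  | cons a t ih =>
    simp only [List.foldl_cons, List.mem_cons]
    by_cases h1 : i - a < 0
    · simp only [h1, if_true]
      constructor
      · rw [(ih acc).1]
        constructor
        · rintro ⟨hn, hall⟩
          refine ⟨hn, ?_⟩
          intro jp hjp
          rcases hjp with rfl | hm
          · omega
          · exact hall jp hm
        · rintro ⟨hn, hall⟩
          exact ⟨hn, fun jp hm => hall jp (Or.inr hm)⟩
      · intro m hm
        obtain ⟨hat, hub, hacc⟩ := (ih acc).2 m hm
        refine ⟨?_, ?_, hacc⟩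
        · rcases hat with ⟨jp, hjp, hv, he⟩ | h
          · exact Or.inl ⟨jp, Or.inr hjp, hv, he⟩
          · exact Or.inr h
        · rintro jp (rfl | hjp) hge hne
          · omega
          · exact hub jp hjp hge hne
    · by_cases h2 : PySem.List.pyGetD dp (i - a) 0 = pvNegInf
      · simp only [h1, if_false, h2, if_true]
        constructor
        · rw [(ih acc).1]
          constructor
          · rintro ⟨hn, hall⟩
            refine ⟨hn, ?_⟩
            intro jp hjp
            rcases hjp with rfl | hm
            · rintro ⟨-, hne⟩
              exact hne h2
            · exact hall jp hm
          · rintro ⟨hn, hall⟩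
            exact ⟨hn, fun jp hm => hall jp (Or.inr hm)⟩
        · intro m hm
          obtain ⟨hat, hub, hacc⟩ := (ih acc).2 m hm
          refine ⟨?_, ?_, hacc⟩
          · rcases hat with ⟨jp, hjp, hv, he⟩ | h
            · exact Or.inl ⟨jp, Or.inr hjp, hv, he⟩
            · exact Or.inr h
          · rintro jp (rfl | hjp) hge hne
            · exact absurd h2 hne
            · exact hub jp hjp hge hne
      · simp only [h1, if_false, h2]
        cases acc with
        | none =>
          constructor
          · constructor
            · intro hfold
              obtain ⟨hc, -⟩ := (ih (some (PySem.List.pyGetD dp (i - a) 0))).1.mp hfold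
              cases hc
            · rintro ⟨-, hall⟩
              exact absurd ⟨by omega, h2⟩ (hall a (Or.inl rfl))
          · intro m hm
            obtain ⟨hat, hub, hacc⟩ := (ih (some (PySem.List.pyGetD dp (i - a) 0))).2 m hm
            have hvm : PySem.List.pyGetD dp (i - a) 0 ≤ m := hacc _ rfl
            refine ⟨?_, ?_, ?_⟩
            · rcases hat with ⟨jp, hjp, hvv, he⟩ | h
              · exact Or.inl ⟨jp, Or.inr hjp, hvv, he⟩
              · exact Or.inl ⟨a, Or.inl rfl, ⟨by omega, h2⟩, by injection h⟩
            · rintro jp (rfl | hjp) hge hne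
              · exact hvm
              · exact hub jp hjp hge hne
            · intro m₀ hm₀
              cases hm₀
        | some m₀ =>
          constructor
          · constructor
            · intro hfold
              obtain ⟨hc, -⟩ := (ih (some (max m₀ (PySem.List.pyGetD dp (i - a) 0)))).1.mp hfold
              cases hc
            · rintro ⟨-, hall⟩
              exact absurd ⟨by omega, h2⟩ (hall a (Or.inl rfl))
          · intro m hm
            obtain ⟨hat, hub, hacc⟩ := (ih (some (max m₀ (PySem.List.pyGetD dp (i - a) 0)))).2 m hm
            have hmaxm : max m₀ (PySem.List.pyGetD dp (i - a) 0) ≤ m := hacc _ rfl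
            refine ⟨?_, ?_, ?_⟩
            · rcases hat with ⟨jp, hjp, hvv, he⟩ | h
              · exact Or.inl ⟨jp, Or.inr hjp, hvv, he⟩
              · have hmx : max m₀ (PySem.List.pyGetD dp (i - a) 0) = m := by injection h
                rcases le_total m₀ (PySem.List.pyGetD dp (i - a) 0) with hle | hle
                · exact Or.inl ⟨a, Or.inl rfl, ⟨by omega, h2⟩, by omega⟩
                · exact Or.inr (by rw [show m₀ = m from by omega])
            · rintro jp (rfl | hjp) hge hne
              · omega
              · exact hub jp hjp hge hne
            · intro m₁ hm₁
              injection hm₁ with hm₁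
              omega

-- reading the reference dp list at a computed index
theorem pvDp_read (x : Int) (b : List Int) {j i : Nat} (h : j < i) :
    PySem.List.pyGetD (pvDp x b i) ((j : Nat) : Int) 0 = pvVal x b j := by
  rw [PySem.List.pyGetD_natCast, pvDp_getD x b h]

theorem pvWMax_none_iff (x : Int) (b : List Int) (i : Nat) :
    pvWMax x (pvDp x b i) (i : Int) = none ↔
      ∀ j : Nat, j < i → (i : Int) - x ≤ (j : Int) → pvVal x b j ≠ pvNegInf → False := by
  unfold pvWMax
  rw [(pvW_aux (pvDp x b i) (i : Int) (PySem.List.pyRange 1 (x + 1) 1) none).1]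
  simp only [true_and]
  constructor
  · intro hall j hj hwin hne
    have hjp : ((i : Int) - (j : Int)) ∈ PySem.List.pyRange 1 (x + 1) 1 :=
      PySem.List.mem_pyRange_one.mpr ⟨by omega, by omega⟩
    refine hall _ hjp ⟨by omega, ?_⟩
    rw [show (i : Int) - ((i : Int) - (j : Int)) = ((j : Nat) : Int) from by omega,
        pvDp_read x b hj]
    exact hne
  · intro hnone jp hjp ⟨hge, hne⟩
    have hmem := PySem.List.mem_pyRange_one.mp hjp
    have hj : ((i : Int) - jp).toNat < i := by omega
    rw [show (i : Int) - jp = (((i : Int) - jp).toNat : Int) from by omega,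
        pvDp_read x b hj] at hne
    exact hnone _ hj (by omega) hne

theorem pvWMax_some (x : Int) (b : List Int) (i : Nat) (m : Int)
    (h : pvWMax x (pvDp x b i) (i : Int) = some m) :
    (∃ j : Nat, j < i ∧ (i : Int) - x ≤ (j : Int) ∧ pvVal x b j ≠ pvNegInf ∧ pvVal x b j = m)
  ∧ (∀ j : Nat, j < i → (i : Int) - x ≤ (j : Int) → pvVal x b j ≠ pvNegInf → pvVal x b j ≤ m) := by
  unfold pvWMax at h
  obtain ⟨hat, hub, -⟩ := (pvW_aux (pvDp x b i) (i : Int) (PySem.List.pyRange 1 (x + 1) 1) none).2 m h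
  constructor
  · rcases hat with ⟨jp, hjp, ⟨hge, hne⟩, he⟩ | hbad
    · have hmem := PySem.List.mem_pyRange_one.mp hjp
      have hj : ((i : Int) - jp).toNat < i := by omega
      rw [show (i : Int) - jp = (((i : Int) - jp).toNat : Int) from by omega,
          pvDp_read x b hj] at hne he
      exact ⟨_, hj, by omega, hne, he⟩
    · cases hbad
  · intro j hj hwin hne
    have hjp : ((i : Int) - (j : Int)) ∈ PySem.List.pyRange 1 (x + 1) 1 :=
      PySem.List.mem_pyRange_one.mpr ⟨by omega, by omega⟩
    have := hub _ hjp (by omega)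
    rw [show (i : Int) - ((i : Int) - (j : Int)) = ((j : Nat) : Int) from by omega,
        pvDp_read x b hj] at this
    exact this hne

theorem pvWMax_eq_some (x : Int) (b : List Int) (i : Nat) (m : Int)
    (hex : ∃ j : Nat, j < i ∧ (i : Int) - x ≤ (j : Int) ∧ pvVal x b j ≠ pvNegInf ∧ pvVal x b j = m)
    (hub : ∀ j : Nat, j < i → (i : Int) - x ≤ (j : Int) → pvVal x b j ≠ pvNegInf → pvVal x b j ≤ m) :
    pvWMax x (pvDp x b i) (i : Int) = some m := by
  obtain ⟨j0, hj0, hw0, hne0, he0⟩ := hex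
  cases h : pvWMax x (pvDp x b i) (i : Int) with
  | none => exact absurd ((pvWMax_none_iff x b i).mp h j0 hj0 hw0 hne0) (by simp)
  | some m' =>
    obtain ⟨⟨j1, hj1, hw1, hne1, he1⟩, hub'⟩ := pvWMax_some x b i m' h
    have h1 : m' ≤ m := he1 ▸ hub j1 hj1 hw1 hne1
    have h2 : m ≤ m' := he0 ▸ hub' j0 hj0 hw0 hne0
    rw [show m = m' from by omega]

-- ---- the deque invariant ----
-- Before iteration i the deque (newest first) is strictly decreasing in index /
-- increasing in value, holds only computed non-sentinel dp values, and dominates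
-- every reachable window candidate.
def pvInv (x : Int) (b : List Int) (i : Nat) (dq : List (Int × Int)) : Prop :=
  dq.Pairwise (fun p q => q.1 < p.1 ∧ p.2 < q.2)
  ∧ (∀ p ∈ dq, ∃ j : Nat, p.1 = (j : Int) ∧ j + 1 < i ∧ p.2 = pvVal x b j ∧ pvVal x b j ≠ pvNegInf)
  ∧ (∀ j : Nat, j + 1 < i → (i : Int) - 1 - x ≤ (j : Int) → pvVal x b j ≠ pvNegInf →
      ∃ p ∈ dq, (j : Int) ≤ p.1 ∧ pvVal x b j ≤ p.2)

-- one iteration of B's loop, deque part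
def pvDq2 (x : Int) (b : List Int) (i : Nat) (dq : List (Int × Int)) : List (Int × Int) :=
  pvEvict ((i : Int) - x)
    (if pvVal x b (i - 1) ≠ pvNegInf
     then ((i : Int) - 1, pvVal x b (i - 1)) :: pvPopLE (pvVal x b (i - 1)) dq
     else dq)

theorem pvStep (x : Int) (b : List Int) (i : Nat) (hi : 1 ≤ i) (dq : List (Int × Int))
    (hInv : pvInv x b i dq) :
    pvInv x b (i + 1) (pvDq2 x b i dq)
    ∧ (match (pvDq2 x b i dq).getLast? with
       | some p => if p.2 + b.getD i 0 < pvNegInf then pvNegInf else p.2 + b.getD i 0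
       | none => pvNegInf) = pvVal x b i := by
  obtain ⟨hP, hE, hC⟩ := hInv
  -- mid facts about dq1 (after the push)
  set dq1 : List (Int × Int) :=
    (if pvVal x b (i - 1) ≠ pvNegInf
     then ((i : Int) - 1, pvVal x b (i - 1)) :: pvPopLE (pvVal x b (i - 1)) dq
     else dq) with hdq1
  have hP1 : dq1.Pairwise (fun p q => q.1 < p.1 ∧ p.2 < q.2) := by
    rw [hdq1]
    split
    · rw [pvPopLE_eq_dropWhile]
      refine List.pairwise_cons.mpr ⟨?_, hP.sublist (List.dropWhile_sublist _)⟩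
      intro q hq
      have hqdq : q ∈ dq := (List.dropWhile_sublist _).mem hq
      obtain ⟨j, hj1, hj2, -, -⟩ := hE q hqdq
      have hval : pvVal x b (i - 1) < q.2 :=
        pv_mem_dropWhile_val (hP.imp (fun h => h.2)) hq
      exact ⟨by omega, hval⟩
    · exact hP
  have hE1 : ∀ p ∈ dq1, ∃ j : Nat, p.1 = (j : Int) ∧ j < i ∧ p.2 = pvVal x b j ∧
      pvVal x b j ≠ pvNegInf := by
    rw [hdq1]
    split
    · rename_i hprev
      intro p hp
      rcases List.mem_cons.mp hp with rfl | hmem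
      · exact ⟨i - 1, by omega, by omega, rfl, hprev⟩
      · rw [pvPopLE_eq_dropWhile] at hmem
        obtain ⟨j, hj1, hj2, hj3, hj4⟩ := hE p ((List.dropWhile_sublist _).mem hmem)
        exact ⟨j, hj1, by omega, hj3, hj4⟩
    · intro p hp
      obtain ⟨j, hj1, hj2, hj3, hj4⟩ := hE p hp
      exact ⟨j, hj1, by omega, hj3, hj4⟩
  have hC1 : ∀ j : Nat, j < i → (i : Int) - x ≤ (j : Int) → pvVal x b j ≠ pvNegInf →
      ∃ p ∈ dq1, (j : Int) ≤ p.1 ∧ pvVal x b j ≤ p.2 := by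
    intro j hj hwin hne
    rw [hdq1]
    by_cases hj' : j = i - 1
    · subst hj'
      rw [if_pos (by simpa using hne)]
      exact ⟨((i : Int) - 1, pvVal x b (i - 1)), List.mem_cons_self, by omega, le_refl _⟩
    · obtain ⟨p, hp, hp1, hp2⟩ := hC j (by omega) (by omega) hne
      split
      · rename_i hprev
        rw [pvPopLE_eq_dropWhile]
        rw [← List.takeWhile_append_dropWhile
              (p := fun q => decide (q.2 ≤ pvVal x b (i - 1))) (l := dq)] at hp
        rcases List.mem_append.mp hp with htk | hdr
        · have hle := List.mem_takeWhile_imp htk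
          simp only [decide_eq_true_eq] at hle
          exact ⟨((i : Int) - 1, pvVal x b (i - 1)), List.mem_cons_self, by omega, by omega⟩
        · exact ⟨p, List.mem_cons_of_mem _ hdr, hp1, hp2⟩
      · exact ⟨p, hp, hp1, hp2⟩
  -- facts about dq2 (after the eviction)
  have hP2 : (pvDq2 x b i dq).Pairwise (fun p q => q.1 < p.1 ∧ p.2 < q.2) :=
    hP1.sublist (pvEvict_sublist _ _)
  have hE2 : ∀ p ∈ pvDq2 x b i dq, ∃ j : Nat, p.1 = (j : Int) ∧ j < i ∧
      (i : Int) - x ≤ p.1 ∧ p.2 = pvVal x b j ∧ pvVal x b j ≠ pvNegInf := by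
    intro p hp
    have hbd : (i : Int) - x ≤ p.1 :=
      pv_mem_evict_bound (hP1.imp (fun h => h.1)) hp
    obtain ⟨j, hj1, hj2, hj3, hj4⟩ := hE1 p ((pvEvict_sublist _ _).mem hp)
    exact ⟨j, hj1, hj2, hbd, hj3, hj4⟩
  have hC2 : ∀ j : Nat, j < i → (i : Int) - x ≤ (j : Int) → pvVal x b j ≠ pvNegInf →
      ∃ p ∈ pvDq2 x b i dq, (j : Int) ≤ p.1 ∧ pvVal x b j ≤ p.2 := by
    intro j hj hwin hne
    obtain ⟨p, hp, hp1, hp2⟩ := hC1 j hj hwin hne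
    exact ⟨p, pv_mem_evict hp (by omega), hp1, hp2⟩
  constructor
  · refine ⟨hP2, ?_, ?_⟩
    · intro p hp
      obtain ⟨j, hj1, hj2, -, hj3, hj4⟩ := hE2 p hp
      exact ⟨j, hj1, by omega, hj3, hj4⟩
    · intro j hj hwin hne
      exact hC2 j (by omega) (by push_cast at hwin ⊢; omega) hne
  · -- the read-off value is the reference dp value at i
    have hvi : pvVal x b i = match pvWMax x (pvDp x b i) (i : Int) with
        | none => pvNegInf
        | some m => max pvNegInf (m + b.getD i 0) := pvVal_eq x b i |>.trans (by
      rw [if_neg (by omega)])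
    cases hlast : (pvDq2 x b i dq).getLast? with
    | none =>
      have hempty : pvDq2 x b i dq = [] := List.getLast?_eq_none_iff.mp hlast
      have hnone : pvWMax x (pvDp x b i) (i : Int) = none := by
        rw [pvWMax_none_iff]
        intro j hj hwin hne
        obtain ⟨p, hp, -⟩ := hC2 j hj hwin hne
        rw [hempty] at hp
        cases hp
      rw [hvi, hnone]
    | some p =>
      obtain ⟨j0, hj01, hj02, hj03, hj04, hj05⟩ := hE2 p (List.mem_of_getLast? hlast)
      have hsome : pvWMax x (pvDp x b i) (i : Int) = some p.2 := by
        apply pvWMax_eq_some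
        · exact ⟨j0, hj02, by omega, hj05, hj04.symm⟩
        · intro j hj hwin hne
          obtain ⟨q, hq, hq1, hq2⟩ := hC2 j hj hwin hne
          rcases pv_getLast_max hlast hP2 q hq with rfl | hlt
          · exact hq2
          · omega
      rw [hvi, hsome]
      show (if p.2 + b.getD i 0 < pvNegInf then pvNegInf else p.2 + b.getD i 0)
          = max pvNegInf (p.2 + b.getD i 0)
      rw [max_def]
      split_ifs <;> omega

theorem pvB_fold (x : Int) (b : List Int) (i : Nat) (h1 : 1 ≤ i) :
    ∃ dq, (PySem.List.pyRange 1 (i : Int) 1).foldl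
      (fun (st : List (Int × Int) × Int) i =>
        let dq := if st.2 ≠ pvNegInf then (i - 1, st.2) :: pvPopLE st.2 st.1 else st.1
        let dq := pvEvict (i - x) dq
        let cur := match dq.getLast? with
          | some p =>
            if p.2 + PySem.List.pyGetD b i 0 < pvNegInf then pvNegInf
            else p.2 + PySem.List.pyGetD b i 0
          | none => pvNegInf
        (dq, cur)) ([], (PySem.List.pyGet? b 0).getD 0)
    = (dq, pvVal x b (i - 1)) ∧ pvInv x b i dq := by
  induction i, h1 using Nat.le_induction with
  | base =>
    refine ⟨[], ?_, ?_⟩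
    · rw [show ((1 : Nat) : Int) = (1 : Int) from by norm_num,
          PySem.List.pyRange_one_eq_nil le_rfl, List.foldl_nil]
      rw [pvVal_eq]
      simp [PySem.List.pyGet?_zero, List.getD_eq_getElem?_getD]
    · refine ⟨List.Pairwise.nil, by simp, ?_⟩
      intro j hj
      omega
  | succ i h1 ih =>
    obtain ⟨dq, hfold, hinv⟩ := ih
    have hii : ((i + 1 : Nat) : Int) = (i : Int) + 1 := by push_cast; ring
    obtain ⟨hinv', hval⟩ := pvStep x b i h1 dq hinv
    refine ⟨pvDq2 x b i dq, ?_, hinv'⟩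
    rw [hii, PySem.List.pyRange_one_succ_right (by omega), List.foldl_append, hfold,
        List.foldl_cons, List.foldl_nil]
    simp only []
    have hprev : (dq, pvVal x b (i - 1)).2 = pvVal x b (i - 1) := rfl
    rw [Prod.mk.injEq]
    constructor
    · show pvEvict ((i : Int) - x)
          (if pvVal x b (i - 1) ≠ pvNegInf
           then ((i : Int) - 1, pvVal x b (i - 1)) :: pvPopLE (pvVal x b (i - 1)) dq
           else dq) = pvDq2 x b i dq
      rfl
    · show (match (pvEvict ((i : Int) - x)
          (if pvVal x b (i - 1) ≠ pvNegInf
           then ((i : Int) - 1, pvVal x b (i - 1)) :: pvPopLE (pvVal x b (i - 1)) dq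
           else dq)).getLast? with
        | some p =>
          if p.2 + PySem.List.pyGetD b (i : Int) 0 < pvNegInf then pvNegInf
          else p.2 + PySem.List.pyGetD b (i : Int) 0
        | none => pvNegInf) = pvVal x b (i + 1 - 1)
      rw [PySem.List.pyGetD_natCast]
      have : PySem.List.pyGetD b (i : Int) 0 = b.getD i 0 := PySem.List.pyGetD_natCast b i 0
      show (match (pvDq2 x b i dq).getLast? with
        | some p => if p.2 + b.getD i 0 < pvNegInf then pvNegInf else p.2 + b.getD i 0
        | none => pvNegInf) = pvVal x b (i + 1 - 1)
      rw [show i + 1 - 1 = i from rfl]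
      exact hval

theorem pvB_eq (arr : List Int) (h : 2 ≤ arr.length) :
    DynamicAdventure_alt arr
      = pvVal ((PySem.List.pyGet? arr 0).getD 0) arr.tail (arr.tail.length - 1) := by
  unfold DynamicAdventure_alt
  rw [PySem.List.slice_from_one]
  obtain ⟨dq, hfold, -⟩ := pvB_fold ((PySem.List.pyGet? arr 0).getD 0) arr.tail
    arr.tail.length (by simp [List.length_tail]; omega)
  simp only []
  rw [hfold]

-- ===== VERDICT (by name: the statement is the Claim_ definition above) =====
theorem DynamicAdventure_spec : Claim_equal_DynamicAdventure := by
  intro arr _ hpre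
  unfold Spec_DynamicAdventure
  rw [pvA_eq arr hpre, pvB_eq arr hpre]
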